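-- pv_equiv track=rewrite | github.com/gzh23/python_operator | DictionaryInt.py | dictionaryEncoding
-- ===== SOURCE A (Python) =====
-- def dictionaryEncoding(input_list):
--     num_dict = {}
--     nums = []
--     indexs = []
--     for num in input_list:
--         if num not in num_dict:
--             nums.append(num)
--             num_dict[num] = len(nums) - 1
--         indexs.append(num_dict[num])
--     return nums, indexs
-- ===== SOURCE B (Python) =====
-- def dictionaryEncoding(input_list):
--     nums = [x for i, x in enumerate(input_list) if input_list.index(x) == i]
--     indexs = [nums.index(x) for x in input_list]
--     return nums, indexs
-- ===== Notes on version B (the rewrite author's own statement) =====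
-- stated objective: alternative
-- what changed: Removes the dictionary and the stateful loop entirely: nums is a stateless comprehension keeping elements at their first-occurrence positions (input_list.index(x) == i) and each code is nums.index(x), a positional scan; A instead grows a hash map while appending codes in one interleaved pass.
import Mathlib
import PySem

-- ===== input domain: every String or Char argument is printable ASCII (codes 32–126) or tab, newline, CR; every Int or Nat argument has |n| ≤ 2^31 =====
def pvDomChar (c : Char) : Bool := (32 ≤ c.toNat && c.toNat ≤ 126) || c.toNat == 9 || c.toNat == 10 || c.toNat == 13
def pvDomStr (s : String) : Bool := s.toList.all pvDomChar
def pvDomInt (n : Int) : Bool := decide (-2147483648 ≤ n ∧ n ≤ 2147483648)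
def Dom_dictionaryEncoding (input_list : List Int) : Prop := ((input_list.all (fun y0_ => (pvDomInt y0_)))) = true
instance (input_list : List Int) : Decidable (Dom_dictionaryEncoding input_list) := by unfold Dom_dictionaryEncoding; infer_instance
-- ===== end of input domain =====

-- B removes A's dictionary and stateful loop: nums keeps first-occurrence positions, codes are positional scans (alternative, trades speed for statelessness).

-- ===== PORT A =====
-- A: one pass; the dict is grown while appending new values; num_dict[num] is always
-- present at the lookup (just inserted or already there), so getD 0 is exact.
def dictionaryEncoding (input_list : List Int) : List Int × List Int :=
  let st := input_list.foldl
    (fun (st : PySem.Dict Int Int × List Int × List Int) num =>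
      let p :=
        if st.1.contains num then (st.1, st.2.1)
        else
          let nums' := st.2.1 ++ [num]
          (st.1.insert num ((nums'.length : Int) - 1), nums')
      (p.1, p.2, st.2.2 ++ [p.1.getD num 0]))
    (PySem.Dict.empty, [], [])
  (st.2.1, st.2.2)

-- ===== PORT B =====
-- B: nums = [x for i, x in enumerate(l) if l.index(x) == i]; indexs = [nums.index(x) for x in l].
-- l.index / nums.index never raise here (the scanned element is in the list), so the
-- Option returned by PySem.List.index? is always some; the 0 default is unreachable.
def dictionaryEncoding_alt (input_list : List Int) : List Int × List Int :=
  let nums : List Int :=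
    ((PySem.List.enumerate input_list).filter
      (fun p => (PySem.List.index? input_list p.2).map (fun k => (k : Int)) == some p.1)).map
      (fun p => p.2)
  (nums,
   input_list.map (fun x =>
     match PySem.List.index? nums x with
     | some k => (k : Int)
     | none => 0))

-- ===== PRECONDITION & SPEC =====
def Spec_dictionaryEncoding (input_list : List Int) (out : List Int × List Int) : Prop := out = dictionaryEncoding_alt input_list
instance (input_list : List Int) (out : List Int × List Int) : Decidable (Spec_dictionaryEncoding input_list out) := by unfold Spec_dictionaryEncoding; infer_instance

-- ===== CLAIM (what is proved, stated in full; the proofs are below) =====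
def Claim_equal_dictionaryEncoding : Prop := ∀ (input_list : List Int), Dom_dictionaryEncoding input_list → Spec_dictionaryEncoding input_list (dictionaryEncoding input_list)

-- ===== LEMMAS AND PROOFS =====

-- first-occurrence dedup appended to an accumulator: the common characterisation
def dedupApp : List Int → List Int → List Int
  | nums, [] => nums
  | nums, x :: rest => if x ∈ nums then dedupApp nums rest else dedupApp (nums ++ [x]) rest

theorem dedupApp_prefix (l nums : List Int) : ∃ t, dedupApp nums l = nums ++ t := by
  induction l generalizing nums with
  | nil => exact ⟨[], by simp [dedupApp]⟩
  | cons x rest ih =>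
    by_cases hx : x ∈ nums
    · obtain ⟨t, ht⟩ := ih nums
      exact ⟨t, by simp [dedupApp, hx, ht]⟩
    · obtain ⟨t, ht⟩ := ih (nums ++ [x])
      exact ⟨x :: t, by simp [dedupApp, hx, ht]⟩

theorem idxOf_dedupApp_of_mem {v : Int} (l nums : List Int) (h : v ∈ nums) :
    (dedupApp nums l).idxOf v = nums.idxOf v := by
  obtain ⟨t, ht⟩ := dedupApp_prefix l nums
  rw [ht, List.idxOf_append_of_mem h]

theorem mem_dedupApp {v : Int} (l : List Int) (nums : List Int) (h : v ∈ nums ∨ v ∈ l) :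
    v ∈ dedupApp nums l := by
  induction l generalizing nums with
  | nil => simpa [dedupApp] using h.resolve_right (by simp)
  | cons x rest ih =>
    by_cases hx : x ∈ nums
    · simp only [dedupApp, hx, if_true]
      refine ih nums ?_
      rcases h with h | h
      · exact Or.inl h
      · rcases List.mem_cons.mp h with rfl | h
        · exact Or.inl hx
        · exact Or.inr h
    · simp only [dedupApp, hx, if_false]
      refine ih (nums ++ [x]) ?_
      rcases h with h | h
      · exact Or.inl (by simp [h])
      · rcases List.mem_cons.mp h with rfl | h
        · exact Or.inl (by simp)
        · exact Or.inr h

-- the dict in A always maps v to its position in the current nums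
def InvA (d : PySem.Dict Int Int) (nums : List Int) : Prop :=
  (∀ v : Int, d.contains v = decide (v ∈ nums)) ∧
  (∀ v ∈ nums, d.getD v 0 = (nums.idxOf v : Int))

theorem foldA_eq (l : List Int) :
    ∀ (d : PySem.Dict Int Int) (nums indexs : List Int), InvA d nums →
    (l.foldl
      (fun (st : PySem.Dict Int Int × List Int × List Int) num =>
        let p :=
          if st.1.contains num then (st.1, st.2.1)
          else
            let nums' := st.2.1 ++ [num]
            (st.1.insert num ((nums'.length : Int) - 1), nums')
        (p.1, p.2, st.2.2 ++ [p.1.getD num 0]))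
      (d, nums, indexs)).2
    = (dedupApp nums l,
       indexs ++ l.map (fun x => ((dedupApp nums l).idxOf x : Int))) := by
  induction l with
  | nil => intro d nums indexs _; simp [dedupApp]
  | cons x rest ih =>
    intro d nums indexs hinv
    obtain ⟨hc, hg⟩ := hinv
    rw [List.foldl_cons]
    by_cases hx : x ∈ nums
    · have hcx : d.contains x = true := by rw [hc]; simpa using hx
      simp only [hcx, if_true]
      rw [ih d nums _ ⟨hc, hg⟩]
      simp [dedupApp, hx, hg x hx, idxOf_dedupApp_of_mem rest nums hx]
    · have hcx : d.contains x = false := by rw [hc]; simpa using hx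
      simp only [hcx, Bool.false_eq_true, if_false]
      have hlen : ((nums ++ [x]).length : Int) - 1 = (nums.length : Int) := by
        simp
      rw [hlen]
      have hinv' : InvA (d.insert x (nums.length : Int)) (nums ++ [x]) := by
        constructor
        · intro v
          rw [PySem.Dict.contains_insert, hc]
          by_cases hvx : v = x <;> simp [hvx]
        · intro v hv
          by_cases hvx : v = x
          · subst hvx
            rw [PySem.Dict.getD_insert_self, List.idxOf_append_of_notMem hx]
            simp [List.idxOf_cons_self]
          · have hvn : v ∈ nums := by
              rcases List.mem_append.mp hv with h | h
              · exact h
              · simp at h; exact absurd h hvx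
            rw [PySem.Dict.getD_insert, if_neg hvx, hg v hvn,
              List.idxOf_append_of_mem hvn]
      rw [ih _ _ _ hinv']
      have hmem : x ∈ nums ++ [x] := by simp
      simp [dedupApp, hx, PySem.Dict.getD_insert_self,
        idxOf_dedupApp_of_mem rest _ hmem, List.idxOf_append_of_notMem hx,
        List.idxOf_cons_self]

-- at position n of l (with tail rest), l.index(x) == n exactly when x is new
theorem index_eq_pos_iff (l : List Int) (n : Nat) (x : Int) (rest : List Int)
    (hd : l.drop n = x :: rest) :
    (PySem.List.index? l x = some n ↔ x ∉ l.take n) := by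
  have hlen : (l.take n).length = n := by
    have : n < l.length := by
      by_contra h
      rw [List.drop_eq_nil_of_le (by omega)] at hd
      exact List.cons_ne_nil x rest hd.symm
    simp [List.length_take, Nat.min_eq_left (Nat.le_of_lt this)]
  constructor
  · intro h hmem
    obtain ⟨pre, suf, hsplit, hprelen, hnotin⟩ := (PySem.List.index?_eq_some_iff l x n).mp h
    have : pre = l.take n := by
      have := congrArg (List.take n) hsplit
      rwa [List.take_left' hprelen, eq_comm] at this
    exact hnotin (this ▸ hmem)
  · intro hnot
    refine (PySem.List.index?_eq_some_iff l x n).mpr ⟨l.take n, rest, ?_, hlen, hnot⟩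
    rw [← hd, List.take_append_drop]

-- B's nums comprehension builds exactly the first-occurrence dedup
theorem filt (l : List Int) : ∀ (rest : List Int) (n : Nat) (nums : List Int),
    l.drop n = rest → (∀ v : Int, v ∈ nums ↔ v ∈ l.take n) →
    nums ++ ((PySem.List.enumerate rest (n : Int)).filter
        (fun p => (PySem.List.index? l p.2).map (fun k => (k : Int)) == some p.1)).map
        (fun p => p.2)
      = dedupApp nums rest := by
  intro rest
  induction rest with
  | nil => intro n nums _ _; simp [PySem.List.enumerate_nil, dedupApp]
  | cons x rest' ih =>
    intro n nums hd hinv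
    have hd' : l.drop (n + 1) = rest' := by
      rw [← List.drop_drop, hd]; rfl
    have hxn : l[n]? = some x := by
      have := congrArg List.head? hd
      rwa [List.head?_drop] at this
    have htake : l.take (n + 1) = l.take n ++ [x] := by
      rw [List.take_add_one, hxn]; rfl
    have hcond : ((PySem.List.index? l x).map (fun k => (k : Int)) == some (n : Int))
        = decide (x ∉ l.take n) := by
      by_cases hmem : x ∈ l.take n
      · have : PySem.List.index? l x ≠ some n := by
          intro h; exact ((index_eq_pos_iff l n x rest' hd).mp h) hmem
        cases hidx : PySem.List.index? l x with
        | none => simp [hmem]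
        | some k =>
          have hkn : k ≠ n := fun h => this (h ▸ hidx)
          simp [hmem, Option.map_some, hkn]
      · have h2 : PySem.List.index? l x = some n := (index_eq_pos_iff l n x rest' hd).mpr hmem
        rw [h2]
        simp [hmem]
    rw [PySem.List.enumerate_cons, List.filter_cons, hcond]
    by_cases hx : x ∈ nums
    · have hxt : x ∈ l.take n := (hinv x).mp hx
      simp only [hxt, not_true, decide_false, Bool.false_eq_true, if_false]
      have hcast : (n : Int) + 1 = ((n + 1 : Nat) : Int) := by push_cast; ring
      rw [hcast, ih (n + 1) nums hd' ?_]
      · simp [dedupApp, hx]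
      · intro v
        rw [hinv v, htake]
        constructor
        · intro h; exact List.mem_append.mpr (Or.inl h)
        · intro h
          rcases List.mem_append.mp h with h | h
          · exact h
          · simp at h; subst h; exact hxt
    · have hxt : x ∉ l.take n := fun h => hx ((hinv x).mpr h)
      simp only [hxt, not_false_iff, decide_true, if_true]
      have hcast : (n : Int) + 1 = ((n + 1 : Nat) : Int) := by push_cast; ring
      rw [List.map_cons]
      have hassoc : nums ++ x :: (((PySem.List.enumerate rest' ((n : Int) + 1)).filter
          (fun p => (PySem.List.index? l p.2).map (fun k => (k : Int)) == some p.1)).map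
          (fun p => p.2))
        = (nums ++ [x]) ++ (((PySem.List.enumerate rest' ((n : Int) + 1)).filter
          (fun p => (PySem.List.index? l p.2).map (fun k => (k : Int)) == some p.1)).map
          (fun p => p.2)) := by simp
      rw [hassoc, hcast, ih (n + 1) (nums ++ [x]) hd' ?_]
      · simp [dedupApp, hx]
      · intro v
        rw [htake]
        constructor
        · intro h
          rcases List.mem_append.mp h with h | h
          · exact List.mem_append.mpr (Or.inl ((hinv v).mp h))
          · exact List.mem_append.mpr (Or.inr h)
        · intro h
          rcases List.mem_append.mp h with h | h
          · exact List.mem_append.mpr (Or.inl ((hinv v).mpr h))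
          · exact List.mem_append.mpr (Or.inr h)

-- ===== VERDICT (by name: the statement is the Claim_ definition above) =====
theorem dictionaryEncoding_spec : Claim_equal_dictionaryEncoding := by
  intro l _
  simp only [Spec_dictionaryEncoding, dictionaryEncoding, dictionaryEncoding_alt]
  have hinv0 : InvA PySem.Dict.empty [] := by
    constructor
    · intro v; simp
    · intro v hv; simp at hv
  rw [foldA_eq l PySem.Dict.empty [] [] hinv0]
  have hnums : ((PySem.List.enumerate l (0 : Int)).filter
      (fun p => (PySem.List.index? l p.2).map (fun k => (k : Int)) == some p.1)).map
      (fun p => p.2) = dedupApp [] l := by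
    have := filt l l 0 [] (by simp) (by simp)
    simpa using this
  have henum : PySem.List.enumerate l = PySem.List.enumerate l (0 : Int) := rfl
  rw [henum, hnums]
  refine Prod.ext rfl ?_
  simp only [List.nil_append]
  apply List.map_congr_left
  intro x hx
  have hmem : x ∈ dedupApp [] l := mem_dedupApp l [] (Or.inr hx)
  have hsome : (PySem.List.index? (dedupApp [] l) x).isSome :=
    (PySem.List.index?_isSome_iff _ _).mpr hmem
  obtain ⟨k, hk⟩ := Option.isSome_iff_exists.mp hsome
  have hkeq : (dedupApp [] l).idxOf x = k := by
    rw [List.idxOf_eq_getD_idxOf?, ← PySem.List.index?_eq_idxOf?, hk]; rfl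
  rw [hk, hkeq]
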